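-- pv_equiv track=rewrite | github.com/mfouda/BIOINF588 | p_loop/naif.py | pLoop_naif
-- ===== SOURCE A (Python) =====
-- def pLoop_naif (seq) :
--     result = False
--     n = len(seq)
--     for i in range(n-8) :
--         if seq[i] == 'A' or seq[i] == 'G' :
--             if seq[i+5] == 'G' and seq[i+6] == 'K' :
--                 if seq[i+7] == 'S' or seq[i+7] == 'T' :
--                     result = True
--     return result
-- ===== SOURCE B (Python) =====
-- def pLoop_naif(seq):
--     # Bitap (shift-and) bit-parallel scan: bit j of R means a length-(j+1)
--     # prefix of the motif [AG]xxxxGK[ST] ends at the current character;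
--     # bit 7 signals a complete match.  Masks are derived from the motif's
--     # fixed-position groups; positions 1-4 are wildcards.
--     groups = [(0, 'AG'), (5, 'G'), (6, 'K'), (7, 'ST')]
--     masks = {}
--     for pos, chars in groups:
--         for ch in chars:
--             masks[ch] = masks.get(ch, 0) | (1 << pos)
--     wild = 0x1E
--     R = 0
--     for c in seq:
--         R = ((R << 1) | 1) & (masks.get(c, 0) | wild)
--         if R & 0x80:
--             return True
--     return False
-- ===== Notes on version B (the rewrite author's own statement) =====
-- stated objective: alternative
-- what changed: Replaced the per-index window test by a Bitap (shift-and) bit-parallel automaton: a single pass maintains one integer whose bit j records that a length-(j+1) motif prefix ends at the current character, so no window indexing occurs; this also fixes A's off-by-one loop bound (range(n-8)) that misses a motif ending at the last character.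
-- intended difference: On strings whose only P-loop motif occurrence ends exactly at the last character, A returns False (its loop bound range(n-8) never tests start n-8) while B returns True, the intended value since the 8-char motif fits entirely in the string. — e.g. on pLoop_naif("AXXXXGKS"): A returns false, B returns true
import Mathlib
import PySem

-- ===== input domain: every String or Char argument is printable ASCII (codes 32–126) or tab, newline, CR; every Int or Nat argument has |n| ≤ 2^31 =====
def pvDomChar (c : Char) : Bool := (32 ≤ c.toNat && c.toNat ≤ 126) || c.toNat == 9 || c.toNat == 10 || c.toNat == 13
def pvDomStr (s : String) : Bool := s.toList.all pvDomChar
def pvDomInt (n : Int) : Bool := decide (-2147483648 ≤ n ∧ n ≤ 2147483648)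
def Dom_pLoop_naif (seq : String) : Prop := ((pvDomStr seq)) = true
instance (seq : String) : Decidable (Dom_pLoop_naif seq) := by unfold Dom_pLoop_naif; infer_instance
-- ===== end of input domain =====

-- B replaces A's per-index window loop by a Bitap (shift-and) bit-parallel automaton;
-- B also fixes A's off-by-one loop bound, finding a motif ending at the very last character.

-- ===== PORT A =====
def pLoop_naif (seq : String) : Bool :=
  (PySem.List.pyRange 0 ((seq.toList.length : Int) - 8) 1).foldl
    (fun result i =>
      if PySem.List.pyGet? seq.toList i == some 'A' || PySem.List.pyGet? seq.toList i == some 'G' then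
        if PySem.List.pyGet? seq.toList (i + 5) == some 'G' && PySem.List.pyGet? seq.toList (i + 6) == some 'K' then
          if PySem.List.pyGet? seq.toList (i + 7) == some 'S' || PySem.List.pyGet? seq.toList (i + 7) == some 'T' then
            true
          else result
        else result
      else result)
    false

-- ===== PORT B =====
-- the motif's fixed-position groups (Source B's `groups`)
def pLoopGroups : List (Nat × String) := [(0, "AG"), (5, "G"), (6, "K"), (7, "ST")]

-- character masks of the Bitap automaton, built from the groups (Source B's `masks` loop)
def pLoopMasks : PySem.Dict Char Nat :=
  pLoopGroups.foldl
    (fun d p => p.2.toList.foldl (fun d ch => d.insert ch (d.getD ch 0 ||| (1 <<< p.1))) d)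
    PySem.Dict.empty

-- Source B's for-loop with early return, as structural recursion over the characters
def pLoopScan : Nat → List Char → Bool
  | _, [] => false
  | R, c :: rest =>
    let R' := ((R <<< 1) ||| 1) &&& (PySem.Dict.getD pLoopMasks c 0 ||| 0x1E)
    if R' &&& 0x80 ≠ 0 then true else pLoopScan R' rest

def pLoop_naif_alt (seq : String) : Bool := pLoopScan 0 seq.toList

-- ===== PRECONDITION & SPEC =====
-- spec-level helper: some P-loop motif occurrence starts somewhere in l
def hasMotif : List Char → Bool
  | a :: r =>
    (['A', 'G'].contains a &&
      ("GKS".toList.isPrefixOf (r.drop 4) || "GKT".toList.isPrefixOf (r.drop 4))) || hasMotif r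
  | [] => false

-- On strings whose only motif occurrence ends exactly at the last character, A returns False
-- (its loop bound range(n-8) never tests start n-8) while B returns True, the intended value
-- since the 8-char motif fits entirely in the string.
def D_pLoop_naif (seq : String) : Prop :=
  hasMotif seq.toList = true ∧ hasMotif seq.toList.dropLast = false
instance (seq : String) : Decidable (D_pLoop_naif seq) := by unfold D_pLoop_naif; infer_instance

def Spec_pLoop_naif (seq : String) (out : Bool) : Prop := ¬ D_pLoop_naif seq → out = pLoop_naif_alt seq
instance (seq : String) (out : Bool) : Decidable (Spec_pLoop_naif seq out) := by unfold Spec_pLoop_naif; infer_instance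

def pvDiffWitness_pLoop_naif : String := "AXXXXGKS"
def pvDiffWitnessOut_pLoop_naif : Bool × Bool := (false, true)

-- ===== CLAIM (what is proved, stated in full; the proofs are below) =====
def Claim_unchanged_pLoop_naif : Prop := ∀ (seq : String), Dom_pLoop_naif seq → Spec_pLoop_naif seq (pLoop_naif seq)
def Claim_changed_pLoop_naif : Prop := Dom_pLoop_naif (pvDiffWitness_pLoop_naif) ∧ D_pLoop_naif (pvDiffWitness_pLoop_naif) ∧ pLoop_naif (pvDiffWitness_pLoop_naif) = pvDiffWitnessOut_pLoop_naif.1 ∧ pLoop_naif_alt (pvDiffWitness_pLoop_naif) = pvDiffWitnessOut_pLoop_naif.2 ∧ pvDiffWitnessOut_pLoop_naif.1 ≠ pvDiffWitnessOut_pLoop_naif.2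
def Claim_exact_pLoop_naif : Prop := ∀ (seq : String), Dom_pLoop_naif seq → D_pLoop_naif seq → pLoop_naif seq ≠ pLoop_naif_alt seq

-- ===== LEMMAS AND PROOFS =====

-- proof-side index formulation of the motif test
def motifIdx (l : List Char) (i : Nat) : Bool :=
  (l[i]? == some 'A' || l[i]? == some 'G') && l[i + 5]? == some 'G' &&
    l[i + 6]? == some 'K' && (l[i + 7]? == some 'S' || l[i + 7]? == some 'T')

theorem motifIdx_length {l : List Char} {i : Nat} (h : motifIdx l i = true) : i + 8 ≤ l.length := by
  unfold motifIdx at h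
  have h4 : l[i + 7]? == some 'S' || l[i + 7]? == some 'T' := by
    cases hb : (l[i + 7]? == some 'S' || l[i + 7]? == some 'T') <;> simp_all
  have hlt : i + 7 < l.length := by
    rcases Bool.or_eq_true_iff.mp h4 with h' | h' <;>
      · obtain ⟨hh, -⟩ := List.getElem?_eq_some_iff.mp (beq_iff_eq.mp h')
        exact hh
  omega

theorem motifIdx_succ (a : Char) (r : List Char) (i : Nat) :
    motifIdx (a :: r) (i + 1) = motifIdx r i := by
  unfold motifIdx
  rw [show i + 1 + 5 = i + 5 + 1 from by omega, show i + 1 + 6 = i + 6 + 1 from by omega,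
      show i + 1 + 7 = i + 7 + 1 from by omega]
  simp [List.getElem?_cons_succ]

theorem head_check (a : Char) (r : List Char) :
    (['A', 'G'].contains a &&
      ("GKS".toList.isPrefixOf (r.drop 4) || "GKT".toList.isPrefixOf (r.drop 4))) = motifIdx (a :: r) 0 := by
  unfold motifIdx
  rw [show "GKS".toList = ['G', 'K', 'S'] from by decide,
      show "GKT".toList = ['G', 'K', 'T'] from by decide,
      show (a :: r)[0 + 5]? = (r.drop 4)[0]? from by rw [List.getElem?_drop]; rfl,
      show (a :: r)[0 + 6]? = (r.drop 4)[1]? from by rw [List.getElem?_drop]; rfl,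
      show (a :: r)[0 + 7]? = (r.drop 4)[2]? from by rw [List.getElem?_drop]; rfl]
  rcases r.drop 4 with _ | ⟨g, _ | ⟨k, _ | ⟨t, rest⟩⟩⟩ <;>
    first
    | (simp [List.isPrefixOf]; done)
    | (simp only [List.isPrefixOf, List.contains_cons, List.contains_nil, Bool.and_true,
         Bool.or_false, List.getElem?_cons_zero, List.getElem?_cons_succ, Option.some_beq_some]
       rw [show ('G' == g) = (g == 'G') from Bool.beq_comm, show ('K' == k) = (k == 'K') from Bool.beq_comm,
           show ('S' == t) = (t == 'S') from Bool.beq_comm, show ('T' == t) = (t == 'T') from Bool.beq_comm]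
       cases a == 'A' <;> cases a == 'G' <;> cases g == 'G' <;> cases k == 'K' <;>
         cases t == 'S' <;> cases t == 'T' <;> rfl)

theorem hasMotif_iff (l : List Char) : hasMotif l = true ↔ ∃ i, motifIdx l i = true := by
  induction l with
  | nil => simp [hasMotif, motifIdx]
  | cons a r ih =>
    rw [hasMotif, Bool.or_eq_true, head_check, ih]
    constructor
    · rintro (h | ⟨i, h⟩)
      · exact ⟨0, h⟩
      · exact ⟨i + 1, by rw [motifIdx_succ]; exact h⟩
    · rintro ⟨i, h⟩
      rcases i with _ | i
      · exact Or.inl h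
      · exact Or.inr ⟨i, by rw [motifIdx_succ] at h; exact h⟩

theorem motifIdx_dropLast_eq (l : List Char) (i : Nat) (h : i + 8 < l.length) :
    motifIdx l.dropLast i = motifIdx l i := by
  unfold motifIdx
  rw [List.dropLast_eq_take,
      List.getElem?_take_of_lt (by omega), List.getElem?_take_of_lt (by omega),
      List.getElem?_take_of_lt (by omega), List.getElem?_take_of_lt (by omega)]

theorem motifIdx_dropLast_iff (l : List Char) :
    (∃ i, motifIdx l.dropLast i = true) ↔ (∃ k, k + 8 < l.length ∧ motifIdx l k = true) := by
  constructor
  · rintro ⟨i, h⟩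
    have hl := motifIdx_length h
    rw [List.length_dropLast] at hl
    have hlt : i + 8 < l.length := by
      have : l.length ≠ 0 := by
        intro h0
        rw [h0] at hl
        omega
      omega
    exact ⟨i, hlt, by rwa [motifIdx_dropLast_eq l i hlt] at h⟩
  · rintro ⟨k, hk, h⟩
    exact ⟨k, by rwa [motifIdx_dropLast_eq l k hk]⟩


theorem pLoop_naif_iff (seq : String) :
    pLoop_naif seq = true ↔ ∃ k : Nat, k + 8 < seq.toList.length ∧ motifIdx seq.toList k = true := by
  unfold pLoop_naif
  have hbody : (fun (result : Bool) (i : Int) =>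
      if PySem.List.pyGet? seq.toList i == some 'A' || PySem.List.pyGet? seq.toList i == some 'G' then
        if PySem.List.pyGet? seq.toList (i + 5) == some 'G' && PySem.List.pyGet? seq.toList (i + 6) == some 'K' then
          if PySem.List.pyGet? seq.toList (i + 7) == some 'S' || PySem.List.pyGet? seq.toList (i + 7) == some 'T' then
            true
          else result
        else result
      else result)
    = fun (result : Bool) (i : Int) =>
      if ((PySem.List.pyGet? seq.toList i == some 'A' || PySem.List.pyGet? seq.toList i == some 'G') &&
          (PySem.List.pyGet? seq.toList (i + 5) == some 'G' && PySem.List.pyGet? seq.toList (i + 6) == some 'K') &&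
          (PySem.List.pyGet? seq.toList (i + 7) == some 'S' || PySem.List.pyGet? seq.toList (i + 7) == some 'T'))
        then true else result := by
    funext r i
    cases h1 : (PySem.List.pyGet? seq.toList i == some 'A' || PySem.List.pyGet? seq.toList i == some 'G') <;>
      cases h2 : (PySem.List.pyGet? seq.toList (i + 5) == some 'G' && PySem.List.pyGet? seq.toList (i + 6) == some 'K') <;>
        cases h3 : (PySem.List.pyGet? seq.toList (i + 7) == some 'S' || PySem.List.pyGet? seq.toList (i + 7) == some 'T') <;>
          simp [*]
  rw [hbody, PySem.List.foldl_if_true_eq, Bool.false_or, List.any_eq_true]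
  constructor
  · rintro ⟨i, hmem, hp⟩
    rw [PySem.List.mem_pyRange_one] at hmem
    obtain ⟨h0, hlt⟩ := hmem
    refine ⟨i.toNat, by omega, ?_⟩
    have hi : i = (i.toNat : Int) := by omega
    rw [hi] at hp
    have e5 : ((i.toNat : Int) + 5) = ((i.toNat + 5 : Nat) : Int) := by push_cast; ring
    have e6 : ((i.toNat : Int) + 6) = ((i.toNat + 6 : Nat) : Int) := by push_cast; ring
    have e7 : ((i.toNat : Int) + 7) = ((i.toNat + 7 : Nat) : Int) := by push_cast; ring
    rw [e5, e6, e7] at hp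
    simp only [PySem.List.pyGet?_natCast] at hp
    simpa [motifIdx, Bool.and_assoc] using hp
  · rintro ⟨k, hk, hm⟩
    refine ⟨(k : Int), ?_, ?_⟩
    · rw [PySem.List.mem_pyRange_one]; omega
    · have e5 : ((k : Int) + 5) = ((k + 5 : Nat) : Int) := by push_cast; ring
      have e6 : ((k : Int) + 6) = ((k + 6 : Nat) : Int) := by push_cast; ring
      have e7 : ((k : Int) + 7) = ((k + 7 : Nat) : Int) := by push_cast; ring
      rw [e5, e6, e7]
      simp only [PySem.List.pyGet?_natCast]
      simpa [motifIdx, Bool.and_assoc] using hm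

-- proof-side abstraction of the automaton: does character c match motif position t?
def patMatch (c : Char) (t : Nat) : Bool :=
  if t = 0 then c == 'A' || c == 'G'
  else if t = 5 then c == 'G'
  else if t = 6 then c == 'K'
  else if t = 7 then c == 'S' || c == 'T'
  else true

-- a length-m motif prefix ends exactly at the end of h
def endM (h : List Char) (m : Nat) : Bool :=
  m ≤ h.length &&
    (List.range m).all (fun t =>
      match h[h.length - m + t]? with
      | some c => patMatch c t
      | none => false)

theorem pLoopMask_val (c : Char) : PySem.Dict.getD pLoopMasks c 0 =
    if ('A' == c) = true then 0x01 else if ('G' == c) = true then 0x21 else if ('K' == c) = true then 0x40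
    else if ('S' == c) = true then 0x80 else if ('T' == c) = true then 0x80 else 0 := by
  have hmk : pLoopMasks = PySem.Dict.mk [('A', 0x01), ('G', 0x21), ('K', 0x40), ('S', 0x80), ('T', 0x80)] := by decide
  rw [hmk]
  simp only [PySem.Dict.getD_eq_get?_getD, PySem.Dict.get?_mk_cons]
  have hemp : (PySem.Dict.mk ([]:List (Char × Nat))).get? c = none := rfl
  rw [hemp]
  split_ifs <;> rfl

theorem maskBit (c : Char) (j : Nat) :
    (PySem.Dict.getD pLoopMasks c 0 ||| 0x1E).testBit j = (decide (j < 8) && patMatch c j) := by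
  rw [pLoopMask_val]
  by_cases hj : j < 8
  · split_ifs with h1 h2 h3 h4 h5
    · obtain rfl := eq_of_beq h1; interval_cases j <;> decide
    · obtain rfl := eq_of_beq h2; interval_cases j <;> decide
    · obtain rfl := eq_of_beq h3; interval_cases j <;> decide
    · obtain rfl := eq_of_beq h4; interval_cases j <;> decide
    · obtain rfl := eq_of_beq h5; interval_cases j <;> decide
    · have n1 : (c == 'A') = false := beq_eq_false_iff_ne.mpr (fun hcc => h1 (by rw [hcc]; exact beq_self_eq_true 'A'))
      have n2 : (c == 'G') = false := beq_eq_false_iff_ne.mpr (fun hcc => h2 (by rw [hcc]; exact beq_self_eq_true 'G'))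
      have n3 : (c == 'K') = false := beq_eq_false_iff_ne.mpr (fun hcc => h3 (by rw [hcc]; exact beq_self_eq_true 'K'))
      have n4 : (c == 'S') = false := beq_eq_false_iff_ne.mpr (fun hcc => h4 (by rw [hcc]; exact beq_self_eq_true 'S'))
      have n5 : (c == 'T') = false := beq_eq_false_iff_ne.mpr (fun hcc => h5 (by rw [hcc]; exact beq_self_eq_true 'T'))
      interval_cases j <;> simp [patMatch, n1, n2, n3, n4, n5] <;> decide
  · have h8 : (256:Nat) ≤ 2 ^ j := by
      calc (256:Nat) = 2 ^ 8 := by norm_num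
      _ ≤ 2 ^ j := Nat.pow_le_pow_right (by norm_num) (by omega)
    have hlt : (if ('A' == c) = true then (0x01:Nat) else if ('G' == c) = true then 0x21 else if ('K' == c) = true then 0x40
        else if ('S' == c) = true then 0x80 else if ('T' == c) = true then 0x80 else 0) ||| 0x1E < 2 ^ j := by
      split_ifs <;> exact lt_of_lt_of_le (by decide) h8
    rw [Nat.testBit_lt_two_pow hlt]
    simp [hj]

theorem endM_append (h : List Char) (c : Char) (j : Nat) :
    endM (h ++ [c]) (j + 1) = (endM h j && patMatch c j) := by
  unfold endM
  by_cases hj : j ≤ h.length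
  · have hb1 : (decide (j + 1 ≤ (h ++ [c]).length)) = true := by simp; omega
    have hb2 : (decide (j ≤ h.length)) = true := by simp [hj]
    rw [List.range_succ, List.all_append]
    simp only [hb1, hb2, Bool.true_and, List.all_cons, List.all_nil, Bool.and_true]
    have hlast : (h ++ [c])[(h ++ [c]).length - (j + 1) + j]? = some c := by
      have : (h ++ [c]).length - (j + 1) + j = h.length := by simp; omega
      rw [this]
      simp
    rw [hlast]
    have hcong : ∀ t ∈ List.range j,
        (match (h ++ [c])[(h ++ [c]).length - (j + 1) + t]? with
          | some c => patMatch c t | none => false)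
        = (match h[h.length - j + t]? with | some c => patMatch c t | none => false) := by
      intro t ht
      rw [List.mem_range] at ht
      have e1 : (h ++ [c]).length - (j + 1) + t = h.length - j + t := by
        simp only [List.length_append, List.length_singleton]; omega
      have e2 : h.length - j + t < h.length := by omega
      rw [e1]
      rw [List.getElem?_append_left e2]
    have hall : (List.range j).all (fun t =>
        (match (h ++ [c])[(h ++ [c]).length - (j + 1) + t]? with
          | some c => patMatch c t | none => false))
        = (List.range j).all (fun t =>
        (match h[h.length - j + t]? with | some c => patMatch c t | none => false)) := by
      rw [Bool.eq_iff_iff, List.all_eq_true, List.all_eq_true]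
      exact forall_congr' fun t => forall_congr' fun ht => by rw [hcong t ht]
    rw [hall, Bool.and_comm]
  · have hb1 : (decide (j + 1 ≤ (h ++ [c]).length)) = false := by simp; omega
    have hb2 : (decide (j ≤ h.length)) = false := by simp; omega
    simp [hb2]

theorem step_testBit (R : Nat) (c : Char) (h : List Char)
    (hR : ∀ j, R.testBit j = (decide (j < 8) && endM h (j + 1))) (j : Nat) :
    (((R <<< 1) ||| 1) &&& (PySem.Dict.getD pLoopMasks c 0 ||| 0x1E)).testBit j
      = (decide (j < 8) && endM (h ++ [c]) (j + 1)) := by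
  rw [Nat.testBit_and, Nat.testBit_or, Nat.testBit_shiftLeft, maskBit, endM_append]
  rcases Nat.eq_zero_or_pos j with rfl | hpos
  · simp [endM]
  · have h1 : (Nat.testBit 1 j) = false := by
      rcases j with _ | j
      · omega
      · simp [Nat.testBit_succ]
    rw [h1, Bool.or_false]
    have hd : (decide (1 ≤ j)) = true := by simp; omega
    rw [hd, Bool.true_and, hR (j - 1)]
    have e : j - 1 + 1 = j := by omega
    rw [e]
    by_cases hj : j < 8
    · have : j - 1 < 8 := by omega
      simp [hj, this]
    · simp [hj]

theorem bit7_and (R' : Nat) : (R' &&& 0x80 ≠ 0) ↔ R'.testBit 7 = true := by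
  have h : R' &&& 0x80 = (R'.testBit 7).toNat * 2 ^ 7 := by
    have := Nat.and_two_pow R' 7
    simpa using this
  rw [h]
  cases hb : R'.testBit 7 <;> simp

theorem pLoopScan_iff (l : List Char) : ∀ (h : List Char) (R : Nat),
    (∀ j, R.testBit j = (decide (j < 8) && endM h (j + 1))) →
    (pLoopScan R l = true ↔ ∃ i < l.length, endM (h ++ l.take (i + 1)) 8 = true) := by
  induction l with
  | nil => intro h R hR; simp [pLoopScan]
  | cons c rest ih =>
    intro h R hR
    rw [pLoopScan]
    have hR' := step_testBit R c h hR
    by_cases h7 : ((R <<< 1) ||| 1) &&& (PySem.Dict.getD pLoopMasks c 0 ||| 0x1E) &&& 0x80 ≠ 0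
    · rw [if_pos h7]
      constructor
      · intro _
        refine ⟨0, by simp, ?_⟩
        have := (bit7_and _).mp h7
        rw [hR' 7] at this
        simpa using this
      · intro _; rfl
    · rw [if_neg h7]
      rw [ih (h ++ [c]) _ hR']
      have h70 : ((R <<< 1) ||| 1) &&& (PySem.Dict.getD pLoopMasks c 0 ||| 0x1E) &&& 0x80 = 0 := by
        by_contra hcc; exact h7 hcc
      have hnot : endM (h ++ [c]) 8 = false := by
        have hb : (((R <<< 1) ||| 1) &&& (PySem.Dict.getD pLoopMasks c 0 ||| 0x1E)).testBit 7 = false := by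
          cases hbb : (((R <<< 1) ||| 1) &&& (PySem.Dict.getD pLoopMasks c 0 ||| 0x1E)).testBit 7
          · rfl
          · exact absurd h70 ((bit7_and _).mpr hbb)
        rw [hR' 7] at hb
        simpa using hb
      constructor
      · rintro ⟨i, hi, hm⟩
        refine ⟨i + 1, by simpa using hi, ?_⟩
        rw [List.take_succ_cons, List.append_cons]
        exact hm
      · rintro ⟨i, hi, hm⟩
        rcases i with _ | i
        · exfalso
          rw [List.take_succ_cons, List.take_zero] at hm
          rw [hnot] at hm
          exact Bool.false_ne_true hm
        · rw [List.take_succ_cons, List.append_cons] at hm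
          exact ⟨i, by simpa using hi, hm⟩

theorem endM_take (l : List Char) (i : Nat) (hi : i < l.length) :
    endM (l.take (i + 1)) 8 = (decide (7 ≤ i) && motifIdx l (i - 7)) := by
  unfold endM
  have hlen : (l.take (i + 1)).length = i + 1 := by
    rw [List.length_take]; omega
  rw [hlen]
  by_cases h7 : 7 ≤ i
  · have hb : (decide (8 ≤ i + 1)) = true := by simp; omega
    rw [hb, Bool.true_and]
    have hd7 : (decide (7 ≤ i)) = true := by simp [h7]
    rw [hd7, Bool.true_and]
    have hr8 : List.range 8 = [0, 1, 2, 3, 4, 5, 6, 7] := by decide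
    rw [hr8]
    simp only [List.all_cons, List.all_nil, Bool.and_true]
    have hidx : ∀ t, t ≤ 7 → (l.take (i + 1))[i + 1 - 8 + t]? = l[i - 7 + t]? := by
      intro t ht
      have e : i + 1 - 8 + t = i - 7 + t := by omega
      rw [e, List.getElem?_take_of_lt (by omega)]
    rw [hidx 0 (by omega), hidx 1 (by omega), hidx 2 (by omega), hidx 3 (by omega),
        hidx 4 (by omega), hidx 5 (by omega), hidx 6 (by omega), hidx 7 (by omega)]
    have g0 := List.getElem?_eq_getElem (l := l) (show i - 7 + 0 < l.length by omega)
    have g1 := List.getElem?_eq_getElem (l := l) (show i - 7 + 1 < l.length by omega)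
    have g2 := List.getElem?_eq_getElem (l := l) (show i - 7 + 2 < l.length by omega)
    have g3 := List.getElem?_eq_getElem (l := l) (show i - 7 + 3 < l.length by omega)
    have g4 := List.getElem?_eq_getElem (l := l) (show i - 7 + 4 < l.length by omega)
    have g5 := List.getElem?_eq_getElem (l := l) (show i - 7 + 5 < l.length by omega)
    have g6 := List.getElem?_eq_getElem (l := l) (show i - 7 + 6 < l.length by omega)
    have g7 := List.getElem?_eq_getElem (l := l) (show i - 7 + 7 < l.length by omega)
    rw [g0, g1, g2, g3, g4, g5, g6, g7]
    unfold motifIdx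
    have g0' : l[i - 7]? = some l[i - 7] := List.getElem?_eq_getElem (by omega)
    rw [g0', g5, g6, g7]
    simp only [patMatch]
    simp [Bool.and_assoc]
  · have hb : (decide (8 ≤ i + 1)) = false := by simp; omega
    simp [h7]

theorem pLoop_naif_alt_iff (seq : String) :
    pLoop_naif_alt seq = true ↔ ∃ k : Nat, motifIdx seq.toList k = true := by
  unfold pLoop_naif_alt
  rw [pLoopScan_iff seq.toList [] 0 (by intro j; simp [endM])]
  constructor
  · rintro ⟨i, hi, hm⟩
    rw [List.nil_append, endM_take seq.toList i hi] at hm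
    have h7 : 7 ≤ i := by
      by_contra hc
      simp [hc] at hm
    refine ⟨i - 7, ?_⟩
    simpa [h7] using hm
  · rintro ⟨k, hm⟩
    have hlen := motifIdx_length hm
    refine ⟨k + 7, by omega, ?_⟩
    rw [List.nil_append, endM_take seq.toList (k + 7) (by omega)]
    simpa [show k + 7 - 7 = k by omega] using hm
theorem A_eq (seq : String) : pLoop_naif seq = hasMotif seq.toList.dropLast := by
  rw [Bool.eq_iff_iff, pLoop_naif_iff, hasMotif_iff]
  exact (motifIdx_dropLast_iff seq.toList).symm

theorem B_eq (seq : String) : pLoop_naif_alt seq = hasMotif seq.toList := by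
  rw [Bool.eq_iff_iff, pLoop_naif_alt_iff, hasMotif_iff]

-- ===== VERDICT (by name: the statement is the Claim_ definition above) =====
theorem pLoop_naif_spec : Claim_unchanged_pLoop_naif := by
  intro seq _ hnd
  show pLoop_naif seq = pLoop_naif_alt seq
  rw [A_eq, B_eq]
  cases hdl : hasMotif seq.toList.dropLast
  · cases hl : hasMotif seq.toList
    · rfl
    · exact absurd ⟨hl, hdl⟩ hnd
  · have hl : hasMotif seq.toList = true := by
      rw [hasMotif_iff]
      obtain ⟨k, _, hm⟩ := (motifIdx_dropLast_iff seq.toList).mp ((hasMotif_iff _).mp hdl)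
      exact ⟨k, hm⟩
    rw [hl]

theorem pLoop_naif_changed : Claim_changed_pLoop_naif := by
  unfold Claim_changed_pLoop_naif; decide

theorem pLoop_naif_tight : Claim_exact_pLoop_naif := by
  intro seq _ hd
  obtain ⟨h1, h2⟩ := hd
  rw [A_eq, B_eq, h1, h2]
  exact Bool.false_ne_true
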